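-- pv_equiv track=rewrite | github.com/Mandava-Kamal-09/Fibrinet | Fibrinet_APP/src/managers/network/collapse_analysis_manager.py | _largest_component_stats
-- ===== SOURCE A (Python) =====
-- def _largest_component_stats(adj):
--     visited = set()
--     max_nodes = 0
--     max_edges = 0
--     for start in adj.keys():
--         if start in visited:
--             continue
--         stack = [start]
--         comp_nodes = set()
--         comp_edges = set()
--         while stack:
--             u = stack.pop()
--             if u in visited:
--                 continue
--             visited.add(u)
--             comp_nodes.add(u)
--             for v, eid in adj.get(u, set()):
--                 comp_edges.add(eid)
--                 if v not in visited:
--                     stack.append(v)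
--         # undirected edges counted twice in adjacency accumulation
--         edge_count = len(comp_edges)
--         if len(comp_nodes) > max_nodes or (len(comp_nodes) == max_nodes and edge_count > max_edges):
--             max_nodes = len(comp_nodes)
--             max_edges = edge_count
--     return max_nodes, max_edges
-- ===== SOURCE B (Python) =====
-- def _largest_component_stats(adj):
--     visited = set()
--     best = (0, 0)
--     for start in adj:
--         if start in visited:
--             continue
--         # pure reachability from start, by BFS layers over the directed adjacency
--         comp = {start}
--         frontier = {start}
--         while frontier:
--             frontier = {v for u in frontier for v, _ in adj.get(u, ())} - comp
--             comp |= frontier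
--         # restrict to the nodes this phase actually claims (earlier components keep theirs)
--         comp -= visited
--         eids = {eid for u in comp for _, eid in adj.get(u, ())}
--         best = max(best, (len(comp), len(eids)))
--         visited |= comp
--     return best
-- ===== Notes on version B (the rewrite author's own statement) =====
-- stated objective: alternative
-- what changed: Replaces the shared-visited DFS with an explicit stack (re-checking visited at every pop and interleaving edge collection with pushes) by per-start BFS layers computing pure reachability with set algebra, then subtracting the already-visited set, building the edge-id set in a comprehension and taking a lexicographic tuple max.
import Mathlib
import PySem

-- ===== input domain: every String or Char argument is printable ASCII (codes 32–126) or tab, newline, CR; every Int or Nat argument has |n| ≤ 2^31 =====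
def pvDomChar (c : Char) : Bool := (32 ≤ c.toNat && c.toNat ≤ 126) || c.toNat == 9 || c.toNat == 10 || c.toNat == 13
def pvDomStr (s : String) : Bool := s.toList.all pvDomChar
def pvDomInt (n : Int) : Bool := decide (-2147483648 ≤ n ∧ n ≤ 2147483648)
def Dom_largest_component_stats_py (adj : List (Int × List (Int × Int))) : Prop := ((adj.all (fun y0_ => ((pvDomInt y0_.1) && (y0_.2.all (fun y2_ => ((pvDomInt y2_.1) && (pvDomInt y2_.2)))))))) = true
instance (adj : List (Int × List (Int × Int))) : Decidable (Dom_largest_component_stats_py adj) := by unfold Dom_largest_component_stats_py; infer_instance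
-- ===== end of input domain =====

-- B replaces the shared-visited explicit-stack DFS by per-start BFS layers (pure
-- reachability, then subtraction of the visited set) with a lexicographic tuple max:
-- a different traversal, proved to give the same (node count, edge count) answer.


-- shared size helpers (used only to compute sufficient fuel for the loops)
def pvDeg (d : PySem.Dict Int (List (Int × Int))) : Nat := (d.values.map List.length).sum
def pvUniv (d : PySem.Dict Int (List (Int × Int))) : List Int :=
  d.keys ++ d.values.flatMap (List.map Prod.fst)

-- ===== PORT A =====
-- the `while stack:` loop; fuel is only a totality guard (proved sufficient below)
def pvDfsA (d : PySem.Dict Int (List (Int × Int))) :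
    Nat → PySem.Set Int → PySem.Set Int → PySem.Set Int → List Int →
    PySem.Set Int × PySem.Set Int × PySem.Set Int
  | 0, visited, compN, compE, _ => (visited, compN, compE)
  | fuel + 1, visited, compN, compE, stack =>
    match stack with
    | [] => (visited, compN, compE)
    | u :: rest =>                                   -- u = stack.pop()
      if u ∈ visited then pvDfsA d fuel visited compN compE rest
      else
        let visited' := PySem.Set.add visited u
        let compN' := PySem.Set.add compN u
        -- for v, eid in adj.get(u, set()): comp_edges.add(eid); if v not in visited: push v
        let es := (d.getD u []).foldl
          (fun (s : PySem.Set Int × List Int) p =>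
            (PySem.Set.add s.1 p.2, if p.1 ∈ visited' then s.2 else p.1 :: s.2))
          (compE, rest)
        pvDfsA d fuel visited' compN' es.1 es.2

def pvStepA (d : PySem.Dict Int (List (Int × Int))) (fuel : Nat)
    (st : PySem.Set Int × Int × Int) (start : Int) : PySem.Set Int × Int × Int :=
  if start ∈ st.1 then st
  else
    let t := pvDfsA d fuel st.1 PySem.Set.empty PySem.Set.empty [start]
    let n := PySem.Set.len t.2.1
    let e := PySem.Set.len t.2.2
    if n > st.2.1 ∨ (n = st.2.1 ∧ e > st.2.2) then (t.1, n, e) else (t.1, st.2.1, st.2.2)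

def largest_component_stats_py (adj : List (Int × List (Int × Int))) : Int × Int :=
  let d := PySem.Dict.ofList adj
  let fuel := 1 + (1 + pvDeg d) * (1 + (pvUniv d).length)
  let r := d.keys.foldl (pvStepA d fuel) (PySem.Set.empty, 0, 0)
  (r.2.1, r.2.2)

-- ===== PORT B =====
-- {v for u in frontier for v, _ in adj.get(u, ())}
def pvSuccSet (d : PySem.Dict Int (List (Int × Int))) (frontier : List Int) : PySem.Set Int :=
  frontier.foldl (fun s u => (d.getD u []).foldl (fun s p => PySem.Set.add s p.1) s)
    PySem.Set.empty

-- the `while frontier:` BFS-layer loop; fuel is only a totality guard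
def pvBfs (d : PySem.Dict Int (List (Int × Int))) :
    Nat → PySem.Set Int → PySem.Set Int → PySem.Set Int
  | 0, comp, _ => comp
  | fuel + 1, comp, frontier =>
    let nxt := PySem.Set.diff (pvSuccSet d frontier) comp
    if nxt.isEmpty then comp else pvBfs d fuel (PySem.Set.union comp nxt) nxt

-- {eid for u in comp for _, eid in adj.get(u, ())}
def pvEids (d : PySem.Dict Int (List (Int × Int))) (comp : List Int) : PySem.Set Int :=
  comp.foldl (fun s u => (d.getD u []).foldl (fun s p => PySem.Set.add s p.2) s)
    PySem.Set.empty

def pvStepB (d : PySem.Dict Int (List (Int × Int))) (fuel : Nat)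
    (st : PySem.Set Int × Int × Int) (start : Int) : PySem.Set Int × Int × Int :=
  if start ∈ st.1 then st
  else
    let reach := pvBfs d fuel [start] [start]
    let comp := PySem.Set.diff reach st.1
    let eids := pvEids d comp
    let n := PySem.Set.len comp
    let e := PySem.Set.len eids
    -- best = max(best, (n, e))  (lexicographic tuple order)
    let best := if st.2.1 < n ∨ (st.2.1 = n ∧ st.2.2 < e) then (n, e) else (st.2.1, st.2.2)
    (PySem.Set.union st.1 comp, best)

def largest_component_stats_py_alt (adj : List (Int × List (Int × Int))) : Int × Int :=
  let d := PySem.Dict.ofList adj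
  let fuel := 2 + (pvUniv d).length
  let r := d.keys.foldl (pvStepB d fuel) (PySem.Set.empty, 0, 0)
  (r.2.1, r.2.2)

-- ===== PRECONDITION & SPEC =====
def Spec_largest_component_stats_py (adj : List (Int × List (Int × Int))) (out : Int × Int) : Prop := out = largest_component_stats_py_alt adj
instance (adj : List (Int × List (Int × Int))) (out : Int × Int) : Decidable (Spec_largest_component_stats_py adj out) := by unfold Spec_largest_component_stats_py; infer_instance

-- ===== CLAIM (what is proved, stated in full; the proofs are below) =====
def Claim_equal_largest_component_stats_py : Prop := ∀ (adj : List (Int × List (Int × Int))), Dom_largest_component_stats_py adj → Spec_largest_component_stats_py adj (largest_component_stats_py adj)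

-- ===== LEMMAS AND PROOFS =====

-- reachability from s avoiding the node set V (every node of the path, s and t included, is outside V)
inductive pvRA (d : PySem.Dict Int (List (Int × Int))) (V : Int → Prop) : Int → Int → Prop
  | refl (s : Int) (h : ¬ V s) : pvRA d V s s
  | tail {s u v : Int} (h1 : pvRA d V s u) (h2 : ∃ p ∈ d.getD u [], v = p.1) (h3 : ¬ V v) :
      pvRA d V s v

theorem pvRA_not_start {d : PySem.Dict Int (List (Int × Int))} {V : Int → Prop} {s t : Int}
    (h : pvRA d V s t) : ¬ V s ∧ ¬ V t := by
  induction h with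
  | refl hs => exact ⟨hs, hs⟩
  | tail h1 h2 h3 ih => exact ⟨ih.1, h3⟩

theorem pvRA_mono {d : PySem.Dict Int (List (Int × Int))} {V V' : Int → Prop}
    (hVV : ∀ x, V' x → V x) {s t : Int} (h : pvRA d V s t) : pvRA d V' s t := by
  induction h with
  | refl hs => exact pvRA.refl _ (fun hx => hs (hVV _ hx))
  | tail h1 h2 h3 ih => exact pvRA.tail ih h2 (fun hx => h3 (hVV _ hx))

theorem pvRA_trans {d : PySem.Dict Int (List (Int × Int))} {V : Int → Prop} {a b c : Int}
    (h1 : pvRA d V a b) (h2 : pvRA d V b c) : pvRA d V a c := by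
  induction h2 with
  | refl hs => exact h1
  | tail h1' h2' h3' ih => exact pvRA.tail ih h2' h3'

theorem pvRA_pop {d : PySem.Dict Int (List (Int × Int))} {V : Int → Prop} {u : Int}
    (hu : ¬ V u) {s t : Int} (h : pvRA d V s t) :
    t = u ∨ pvRA d (fun x => x = u ∨ V x) s t ∨
      ∃ w, (∃ p ∈ d.getD u [], w = p.1) ∧ pvRA d (fun x => x = u ∨ V x) w t := by
  induction h with
  | refl hs =>
    by_cases hsu : s = u
    · exact Or.inl hsu
    · exact Or.inr (Or.inl (pvRA.refl _ (fun hx => hx.elim hsu hs)))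
  | tail h1 h2 h3 ih =>
    rename_i v0
    by_cases hvu : v0 = u
    · exact Or.inl hvu
    · rcases ih with hw | hw | ⟨w', hw', hra⟩
      · subst hw
        exact Or.inr (Or.inr ⟨v0, h2, pvRA.refl _ (fun hx => hx.elim hvu h3)⟩)
      · exact Or.inr (Or.inl (pvRA.tail hw h2 (fun hx => hx.elim hvu h3)))
      · exact Or.inr (Or.inr ⟨w', hw', pvRA.tail hra h2 (fun hx => hx.elim hvu h3)⟩)

theorem pvRA_push {d : PySem.Dict Int (List (Int × Int))} {V : Int → Prop} {u w t : Int}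
    (hu : ¬ V u) (hw : ∃ p ∈ d.getD u [], w = p.1)
    (h : pvRA d (fun x => x = u ∨ V x) w t) : pvRA d V u t := by
  have hwV : ¬ (w = u ∨ V w) := (pvRA_not_start h).1
  have h1 : pvRA d V u w :=
    pvRA.tail (pvRA.refl u hu) hw (fun hx => hwV (Or.inr hx))
  exact pvRA_trans h1 (pvRA_mono (fun x hx => Or.inr hx) h)

theorem pvRA_congr {d : PySem.Dict Int (List (Int × Int))} {V V' : Int → Prop}
    (hVV : ∀ x, V x ↔ V' x) {s t : Int} : pvRA d V s t ↔ pvRA d V' s t :=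
  ⟨pvRA_mono (fun x hx => (hVV x).2 hx), pvRA_mono (fun x hx => (hVV x).1 hx)⟩

-- the one-step stack identity behind the DFS loop
theorem pvRA_step {d : PySem.Dict Int (List (Int × Int))} {V : Int → Prop} {u : Int}
    (hu : ¬ V u) {rest stack' : List Int}
    (hstk : ∀ y, y ∈ stack' ↔ ((∃ p ∈ d.getD u [], y = p.1) ∧ ¬(y = u ∨ V y)) ∨ y ∈ rest)
    (x : Int) :
    (∃ s ∈ u :: rest, pvRA d V s x) ↔
      (x = u ∨ ∃ s ∈ stack', pvRA d (fun z => z = u ∨ V z) s x) := by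
  constructor
  · rintro ⟨s, hs, hra⟩
    rcases pvRA_pop hu hra with h | h | ⟨w, hw, hra'⟩
    · exact Or.inl h
    · rcases List.mem_cons.1 hs with rfl | hs'
      · exact absurd rfl ((pvRA_not_start h).1 ∘ Or.inl)
      · exact Or.inr ⟨s, (hstk s).2 (Or.inr hs'), h⟩
    · have hwm : w ∈ stack' :=
        (hstk w).2 (Or.inl ⟨hw, (pvRA_not_start hra').1⟩)
      exact Or.inr ⟨w, hwm, hra'⟩
  · rintro (rfl | ⟨s, hs, hra⟩)
    · exact ⟨x, List.mem_cons_self, pvRA.refl x hu⟩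
    · rcases (hstk s).1 hs with ⟨hw, _⟩ | hs'
      · exact ⟨u, List.mem_cons_self, pvRA_push hu hw hra⟩
      · exact ⟨s, List.mem_cons.2 (Or.inr hs'), pvRA_mono (fun z hz => Or.inr hz) hra⟩

def pvClosed (d : PySem.Dict Int (List (Int × Int))) (V : Int → Prop) : Prop :=
  ∀ x, V x → ∀ p ∈ d.getD x [], V p.1

theorem pvRA_closed_iff {d : PySem.Dict Int (List (Int × Int))} {V : Int → Prop}
    (hc : pvClosed d V) {s : Int} (t : Int) :
    pvRA d V s t ↔ (pvRA d (fun _ => False) s t ∧ ¬ V t) := by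
  constructor
  · intro h
    refine ⟨pvRA_mono (fun x hx => hx.elim) h, (pvRA_not_start h).2⟩
  · rintro ⟨h, hT⟩
    revert hT
    induction h with
    | refl _ => exact fun hT => pvRA.refl _ hT
    | tail h1 h2 h3 ih =>
      rename_i u0 v0
      intro hT
      have hu0 : ¬ V u0 := by
        intro hVu
        obtain ⟨p, hp, rfl⟩ := h2
        exact hT (hc u0 hVu p hp)
      exact pvRA.tail (ih hu0) h2 hT

theorem pvClosed_after {d : PySem.Dict Int (List (Int × Int))} {V : Int → Prop}
    (hc : pvClosed d V) (start : Int) :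
    pvClosed d (fun x => V x ∨ pvRA d V start x) := by
  rintro x (hx | hx) p hp
  · exact Or.inl (hc x hx p hp)
  · by_cases hv : V p.1
    · exact Or.inl hv
    · exact Or.inr (pvRA.tail hx ⟨p, hp, rfl⟩ hv)

-- membership in the dict's value pool
theorem pvGetD_values {d : PySem.Dict Int (List (Int × Int))} {u : Int} :
    d.getD u [] = [] ∨ d.getD u [] ∈ d.values := by
  unfold PySem.Dict.getD
  cases h : d.get? u with
  | none => simp
  | some v =>
    right
    have hm := PySem.Dict.mem_items_of_get?_eq_some d h
    have : v ∈ List.map (fun x => x.2) d.items :=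
      List.mem_map.2 ⟨(u, v), hm, rfl⟩
    simpa [PySem.Dict.values] using this

theorem pvGetD_len_le (d : PySem.Dict Int (List (Int × Int))) (u : Int) :
    (d.getD u []).length ≤ pvDeg d := by
  rcases pvGetD_values (d := d) (u := u) with h | h
  · simp [h]
  · exact List.single_le_sum (fun x _ => Nat.zero_le x) _ (List.mem_map_of_mem h)

theorem pvGetD_fst_univ {d : PySem.Dict Int (List (Int × Int))} {u : Int} {p : Int × Int}
    (hp : p ∈ d.getD u []) : p.1 ∈ pvUniv d := by
  unfold pvUniv
  rcases pvGetD_values (d := d) (u := u) with h | h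
  · rw [h] at hp; cases hp
  · exact List.mem_append_right _
      (List.mem_flatMap.2 ⟨d.getD u [], h, List.mem_map.2 ⟨p, hp, rfl⟩⟩)

-- generic nested  for u in l: for p in adj.get(u, []): s.add (f p)  fold
theorem pvMemNested (d : PySem.Dict Int (List (Int × Int))) (f : Int × Int → Int) :
    ∀ (l : List Int) (s : PySem.Set Int) (y : Int),
      y ∈ l.foldl (fun s u => (d.getD u []).foldl (fun s p => PySem.Set.add s (f p)) s) s ↔
        y ∈ s ∨ ∃ u ∈ l, ∃ p ∈ d.getD u [], y = f p := by
  intro l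
  induction l with
  | nil => simp
  | cons u l ih =>
    intro s y
    simp only [List.foldl_cons, ih, PySem.Set.mem_foldl_add, List.mem_cons]
    constructor
    · rintro ((h | ⟨p, hp, rfl⟩) | ⟨u', hu', p, hp, rfl⟩)
      · exact Or.inl h
      · exact Or.inr ⟨u, Or.inl rfl, p, hp, rfl⟩
      · exact Or.inr ⟨u', Or.inr hu', p, hp, rfl⟩
    · rintro (h | ⟨u', (rfl | hu'), p, hp, rfl⟩)
      · exact Or.inl (Or.inl h)
      · exact Or.inl (Or.inr ⟨p, hp, rfl⟩)
      · exact Or.inr ⟨u', hu', p, hp, rfl⟩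

theorem pvNodupNested (d : PySem.Dict Int (List (Int × Int))) (f : Int × Int → Int) :
    ∀ (l : List Int) (s : PySem.Set Int), s.Nodup →
      (l.foldl (fun s u => (d.getD u []).foldl (fun s p => PySem.Set.add s (f p)) s) s).Nodup := by
  intro l
  induction l with
  | nil => intro s hs; simpa using hs
  | cons u l ih =>
    intro s hs
    simp only [List.foldl_cons]
    apply ih
    rw [← PySem.Set.update_map_eq_foldl_add]
    exact PySem.Set.nodup_update _ _ hs

-- projections of A's combined (comp_edges, stack) inner fold
theorem pvFoldES_fst (vis : PySem.Set Int) :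
    ∀ (l : List (Int × Int)) (E : PySem.Set Int) (st : List Int),
      (l.foldl (fun (s : PySem.Set Int × List Int) p =>
          (PySem.Set.add s.1 p.2, if p.1 ∈ vis then s.2 else p.1 :: s.2)) (E, st)).1
        = l.foldl (fun s p => PySem.Set.add s p.2) E := by
  intro l
  induction l with
  | nil => intro E st; rfl
  | cons p l ih => intro E st; simp only [List.foldl_cons]; split <;> exact ih _ _

theorem pvFoldES_snd (vis : PySem.Set Int) :
    ∀ (l : List (Int × Int)) (E : PySem.Set Int) (st : List Int),
      (l.foldl (fun (s : PySem.Set Int × List Int) p =>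
          (PySem.Set.add s.1 p.2, if p.1 ∈ vis then s.2 else p.1 :: s.2)) (E, st)).2
        = l.foldl (fun (st : List Int) p => if p.1 ∈ vis then st else p.1 :: st) st := by
  intro l
  induction l with
  | nil => intro E st; rfl
  | cons p l ih => intro E st; simp only [List.foldl_cons]; split <;> exact ih _ _

theorem pvMemPush (vis : PySem.Set Int) (x : Int) :
    ∀ (l : List (Int × Int)) (st : List Int),
      x ∈ l.foldl (fun (st : List Int) p => if p.1 ∈ vis then st else p.1 :: st) st ↔
        ((∃ p ∈ l, x = p.1) ∧ x ∉ vis) ∨ x ∈ st := by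
  intro l
  induction l with
  | nil => simp
  | cons p l ih =>
    intro st
    simp only [List.foldl_cons, List.exists_mem_cons_iff]
    by_cases hpm : p.1 ∈ vis
    · rw [if_pos hpm, ih]
      constructor
      · rintro (h | h)
        · exact Or.inl ⟨Or.inr h.1, h.2⟩
        · exact Or.inr h
      · rintro (⟨(rfl | h), hx⟩ | h)
        · exact absurd hpm hx
        · exact Or.inl ⟨h, hx⟩
        · exact Or.inr h
    · rw [if_neg hpm, ih]
      constructor
      · rintro (h | h)
        · exact Or.inl ⟨Or.inr h.1, h.2⟩
        · rcases List.mem_cons.1 h with rfl | h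
          · exact Or.inl ⟨Or.inl rfl, hpm⟩
          · exact Or.inr h
      · rintro (⟨(rfl | h), hx⟩ | h)
        · exact Or.inr (List.mem_cons_self)
        · exact Or.inl ⟨h, hx⟩
        · exact Or.inr (List.mem_cons.2 (Or.inr h))

theorem pvPushLen (vis : PySem.Set Int) :
    ∀ (l : List (Int × Int)) (st : List Int),
      (l.foldl (fun (st : List Int) p => if p.1 ∈ vis then st else p.1 :: st) st).length
        ≤ st.length + l.length := by
  intro l
  induction l with
  | nil => intro st; simp
  | cons p l ih =>
    intro st
    simp only [List.foldl_cons, List.length_cons]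
    split
    · exact Nat.le_trans (ih st) (by omega)
    · exact Nat.le_trans (ih (p.1 :: st)) (by simp; omega)

-- unvisited measure
def pvM (d : PySem.Dict Int (List (Int × Int))) (visited : List Int) : Nat :=
  ((pvUniv d).toFinset \ visited.toFinset).card

theorem pvM_add {d : PySem.Dict Int (List (Int × Int))} {visited : List Int} {u : Int}
    (hu : u ∈ pvUniv d) (hv : u ∉ visited) :
    pvM d (PySem.Set.add visited u) + 1 = pvM d visited := by
  unfold pvM
  have hadd : PySem.Set.add visited u = visited ++ [u] := by
    unfold PySem.Set.add
    rw [if_neg]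
    simp only [PySem.Set.contains_eq_listContains]
    simpa using hv
  rw [hadd]
  have : (visited ++ [u]).toFinset = insert u visited.toFinset := by
    simp [List.toFinset_append]
  rw [this, Finset.sdiff_insert]
  rw [Finset.card_erase_of_mem (by simp [hu, hv])]
  have hpos : 0 < ((pvUniv d).toFinset \ visited.toFinset).card :=
    Finset.card_pos.2 ⟨u, by simp [hu, hv]⟩
  omega

theorem pvM_le (d : PySem.Dict Int (List (Int × Int))) (visited : List Int) :
    pvM d visited ≤ (pvUniv d).length := by
  unfold pvM
  exact Nat.le_trans (Finset.card_le_card (Finset.sdiff_subset)) (List.toFinset_card_le _)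

-- master lemma about A's DFS loop
theorem pvDfsA_spec (d : PySem.Dict Int (List (Int × Int))) :
    ∀ (fuel : Nat) (visited compN compE stack : List Int),
      visited.Nodup → compN.Nodup → compE.Nodup →
      (∀ x ∈ stack, x ∈ pvUniv d) →
      stack.length + (1 + pvDeg d) * pvM d visited ≤ fuel →
      (pvDfsA d fuel visited compN compE stack).1.Nodup ∧
      (pvDfsA d fuel visited compN compE stack).2.1.Nodup ∧
      (pvDfsA d fuel visited compN compE stack).2.2.Nodup ∧
      (∀ x, x ∈ (pvDfsA d fuel visited compN compE stack).1 ↔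
        x ∈ visited ∨ ∃ s ∈ stack, pvRA d (· ∈ visited) s x) ∧
      (∀ x, x ∈ (pvDfsA d fuel visited compN compE stack).2.1 ↔
        x ∈ compN ∨ ∃ s ∈ stack, pvRA d (· ∈ visited) s x) ∧
      (∀ e, e ∈ (pvDfsA d fuel visited compN compE stack).2.2 ↔
        e ∈ compE ∨ ∃ x, (∃ s ∈ stack, pvRA d (· ∈ visited) s x) ∧ ∃ p ∈ d.getD x [], e = p.2) := by
  intro fuel
  induction fuel with
  | zero =>
    intro visited compN compE stack h1 h2 h3 hstk hfuel
    cases stack with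
    | nil => refine ⟨h1, h2, h3, ?_, ?_, ?_⟩ <;> intro x <;> simp [pvDfsA]
    | cons u rest => exact absurd hfuel (by simp)
  | succ fuel ih =>
    intro visited compN compE stack h1 h2 h3 hstk hfuel
    match stack, hstk, hfuel with
    | [], _, _ =>
      refine ⟨h1, h2, h3, ?_, ?_, ?_⟩ <;> intro x <;> simp [pvDfsA]
    | u :: rest, hstk, hfuel =>
      by_cases hmem : u ∈ visited
      · rw [show pvDfsA d (fuel + 1) visited compN compE (u :: rest) =
            pvDfsA d fuel visited compN compE rest from by simp [pvDfsA, hmem]]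
        have hres := ih visited compN compE rest h1 h2 h3
          (fun x hx => hstk x (List.mem_cons.2 (Or.inr hx)))
          (by simp at hfuel; omega)
        have hset : ∀ x, (∃ s ∈ u :: rest, pvRA d (· ∈ visited) s x) ↔
            (∃ s ∈ rest, pvRA d (· ∈ visited) s x) := by
          intro x
          rw [List.exists_mem_cons_iff]
          constructor
          · rintro (h | h)
            · exact absurd hmem (pvRA_not_start h).1
            · exact h
          · exact Or.inr
        refine ⟨hres.1, hres.2.1, hres.2.2.1, ?_, ?_, ?_⟩
        · intro x; rw [hres.2.2.2.1, hset]
        · intro x; rw [hres.2.2.2.2.1, hset]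
        · intro e
          rw [hres.2.2.2.2.2]
          constructor
          · rintro (h | ⟨x, hx, hp⟩)
            · exact Or.inl h
            · exact Or.inr ⟨x, (hset x).2 hx, hp⟩
          · rintro (h | ⟨x, hx, hp⟩)
            · exact Or.inl h
            · exact Or.inr ⟨x, (hset x).1 hx, hp⟩
      · -- new node u
        have hu_univ : u ∈ pvUniv d := hstk u List.mem_cons_self
        have hstep : pvDfsA d (fuel + 1) visited compN compE (u :: rest) =
            pvDfsA d fuel (PySem.Set.add visited u) (PySem.Set.add compN u)
              ((d.getD u []).foldl (fun s p => PySem.Set.add s p.2) compE)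
              ((d.getD u []).foldl
                (fun (st : List Int) p =>
                  if p.1 ∈ PySem.Set.add visited u then st else p.1 :: st) rest) := by
          simp only [pvDfsA, if_neg hmem]
          rw [pvFoldES_fst, pvFoldES_snd]
        set visited' := PySem.Set.add visited u with hvis'
        set compN' := PySem.Set.add compN u with hcompN'
        set compE' := (d.getD u []).foldl (fun s p => PySem.Set.add s p.2) compE with hcompE'
        set stack' := (d.getD u []).foldl
          (fun (st : List Int) p => if p.1 ∈ visited' then st else p.1 :: st) rest with hstack'
        have hv'n : visited'.Nodup := PySem.Set.nodup_add _ _ h1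
        have hN'n : compN'.Nodup := PySem.Set.nodup_add _ _ h2
        have hE'n : compE'.Nodup := by
          rw [hcompE', ← PySem.Set.update_map_eq_foldl_add]
          exact PySem.Set.nodup_update _ _ h3
        have hstk' : ∀ x ∈ stack', x ∈ pvUniv d := by
          intro x hx
          rcases (pvMemPush visited' x _ _).1 hx with ⟨⟨p, hp, rfl⟩, _⟩ | hx'
          · exact pvGetD_fst_univ hp
          · exact hstk x (List.mem_cons.2 (Or.inr hx'))
        have hMadd := pvM_add hu_univ hmem
        have hfuel' : stack'.length + (1 + pvDeg d) * pvM d visited' ≤ fuel := by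
          have hlen : stack'.length ≤ rest.length + (d.getD u []).length :=
            pvPushLen visited' _ _
          have hdeg := pvGetD_len_le d u
          have hX : (1 + pvDeg d) * pvM d visited =
              (1 + pvDeg d) * pvM d visited' + (1 + pvDeg d) := by
            rw [← hMadd, Nat.mul_add, Nat.mul_one]
          simp only [List.length_cons] at hfuel
          omega
        have hres := ih visited' compN' compE' stack' hv'n hN'n hE'n hstk' hfuel'
        have hmemv' : ∀ x, x ∈ visited' ↔ x ∈ visited ∨ x = u := by
          intro x; rw [hvis']; exact PySem.Set.mem_add _ _ _
        have hVcongr : ∀ s x, pvRA d (· ∈ visited') s x ↔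
            pvRA d (fun z => z = u ∨ z ∈ visited) s x := by
          intro s x
          exact pvRA_congr (fun z => by rw [hmemv']; tauto)
        have hset : ∀ x, (∃ s ∈ u :: rest, pvRA d (· ∈ visited) s x) ↔
            (x = u ∨ ∃ s ∈ stack', pvRA d (· ∈ visited') s x) := by
          intro x
          have := pvRA_step (d := d) (V := (· ∈ visited)) (u := u) hmem
            (rest := rest) (stack' := stack')
            (fun y => by
              rw [hstack', pvMemPush visited' y _ _, hmemv' y]
              constructor
              · rintro (⟨hp, hy⟩ | hy)
                · exact Or.inl ⟨hp, fun h => hy (by tauto)⟩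
                · exact Or.inr hy
              · rintro (⟨hp, hy⟩ | hy)
                · exact Or.inl ⟨hp, fun h => hy (by tauto)⟩
                · exact Or.inr hy) x
          rw [this]
          constructor
          · rintro (rfl | ⟨s', hs', hra⟩)
            · exact Or.inl rfl
            · exact Or.inr ⟨s', hs', (hVcongr s' x).2 hra⟩
          · rintro (rfl | ⟨s', hs', hra⟩)
            · exact Or.inl rfl
            · exact Or.inr ⟨s', hs', (hVcongr s' x).1 hra⟩
        have hmemN' : ∀ x, x ∈ compN' ↔ x ∈ compN ∨ x = u := by
          intro x; rw [hcompN']; exact PySem.Set.mem_add _ _ _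
        have hmemE' : ∀ e, e ∈ compE' ↔ e ∈ compE ∨ ∃ p ∈ d.getD u [], e = p.2 := by
          intro e; rw [hcompE']; exact PySem.Set.mem_foldl_add _ _ _ _
        rw [hstep]
        refine ⟨hres.1, hres.2.1, hres.2.2.1, ?_, ?_, ?_⟩
        · intro x
          rw [hres.2.2.2.1, hmemv' x, hset]
          tauto
        · intro x
          rw [hres.2.2.2.2.1, hmemN' x, hset]
          tauto
        · intro e
          rw [hres.2.2.2.2.2, hmemE' e]
          constructor
          · rintro ((h | hp) | ⟨x, hx, hp⟩)
            · exact Or.inl h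
            · exact Or.inr ⟨u, (hset u).2 (Or.inl rfl), hp⟩
            · exact Or.inr ⟨x, (hset x).2 (Or.inr hx), hp⟩
          · rintro (h | ⟨x, hx, hp⟩)
            · exact Or.inl (Or.inl h)
            · rcases (hset x).1 hx with rfl | hx'
              · exact Or.inl (Or.inr hp)
              · exact Or.inr ⟨x, hx', hp⟩

-- master lemma about B's BFS loop
theorem pvBfs_spec (d : PySem.Dict Int (List (Int × Int))) (start : Int) :
    ∀ (fuel : Nat) (comp frontier : List Int),
      comp.Nodup →
      (∀ x ∈ frontier, x ∈ comp) →
      (∀ x ∈ comp, x = start ∨ x ∈ pvUniv d) →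
      (∀ x ∈ comp, x ∉ frontier → ∀ p ∈ d.getD x [], p.1 ∈ comp) →
      (∀ t ∈ comp, pvRA d (fun _ => False) start t) →
      3 + (pvUniv d).length ≤ fuel + comp.length →
      (pvBfs d fuel comp frontier).Nodup ∧
      (∀ x ∈ comp, x ∈ pvBfs d fuel comp frontier) ∧
      (∀ t ∈ pvBfs d fuel comp frontier, pvRA d (fun _ => False) start t) ∧
      (∀ x ∈ pvBfs d fuel comp frontier, ∀ p ∈ d.getD x [], p.1 ∈ pvBfs d fuel comp frontier) := by
  intro fuel
  induction fuel with
  | zero =>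
    intro comp frontier h1 hfr hsub hcl hsnd hfuel
    exfalso
    have hlen : comp.length ≤ 1 + (pvUniv d).length := by
      have h2 : comp.toFinset.card = comp.length := List.toFinset_card_of_nodup h1
      have h3 : comp.toFinset ⊆ (start :: pvUniv d).toFinset := by
        intro x hx
        rcases hsub x (List.mem_toFinset.1 hx) with rfl | hx'
        · simp
        · simp [hx']
      have h4 := Finset.card_le_card h3
      have h5 := List.toFinset_card_le (start :: pvUniv d)
      simp only [List.length_cons] at h5
      omega
    omega
  | succ fuel ih =>
    intro comp frontier h1 hfr hsub hcl hsnd hfuel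
    have hmemnxt : ∀ y, y ∈ PySem.Set.diff (pvSuccSet d frontier) comp ↔
        ((∃ u ∈ frontier, ∃ p ∈ d.getD u [], y = p.1) ∧ y ∉ comp) := by
      intro y
      rw [PySem.Set.mem_diff]
      unfold pvSuccSet
      rw [pvMemNested]
      simp [PySem.Set.empty]
    by_cases hemp : (PySem.Set.diff (pvSuccSet d frontier) comp).isEmpty
    · rw [show pvBfs d (fuel + 1) comp frontier = comp from by simp [pvBfs, hemp]]
      refine ⟨h1, fun x hx => hx, hsnd, ?_⟩
      intro x hx p hp
      by_cases hxf : x ∈ frontier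
      · by_cases hpc : p.1 ∈ comp
        · exact hpc
        · exfalso
          have : p.1 ∈ PySem.Set.diff (pvSuccSet d frontier) comp :=
            (hmemnxt p.1).2 ⟨⟨x, hxf, p, hp, rfl⟩, hpc⟩
          rw [List.isEmpty_iff.1 hemp] at this
          cases this
      · exact hcl x hx hxf p hp
    · rw [show pvBfs d (fuel + 1) comp frontier =
          pvBfs d fuel (PySem.Set.union comp (PySem.Set.diff (pvSuccSet d frontier) comp))
            (PySem.Set.diff (pvSuccSet d frontier) comp) from by simp [pvBfs, hemp]]
      set nxt := PySem.Set.diff (pvSuccSet d frontier) comp with hnxt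
      set comp' := PySem.Set.union comp nxt with hcomp'
      have hmemc' : ∀ y, y ∈ comp' ↔ y ∈ comp ∨ y ∈ nxt := by
        intro y; exact PySem.Set.mem_union _ _ _
      have hnodupnxt : nxt.Nodup := by
        rw [hnxt]
        apply PySem.Set.nodup_diff
        unfold pvSuccSet
        exact pvNodupNested d Prod.fst frontier PySem.Set.empty List.nodup_nil
      have h1' : comp'.Nodup := PySem.Set.nodup_union _ _ h1
      have hsub' : ∀ x ∈ comp', x = start ∨ x ∈ pvUniv d := by
        intro x hx
        rcases (hmemc' x).1 hx with hx' | hx'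
        · exact hsub x hx'
        · obtain ⟨⟨u, _, p, hp, rfl⟩, _⟩ := (hmemnxt x).1 hx'
          exact Or.inr (pvGetD_fst_univ hp)
      have hsnd' : ∀ t ∈ comp', pvRA d (fun _ => False) start t := by
        intro t ht
        rcases (hmemc' t).1 ht with ht' | ht'
        · exact hsnd t ht'
        · obtain ⟨⟨u, hu, p, hp, rfl⟩, _⟩ := (hmemnxt t).1 ht'
          exact pvRA.tail (hsnd u (hfr u hu)) ⟨p, hp, rfl⟩ (fun h => h)
      have hcl' : ∀ x ∈ comp', x ∉ nxt → ∀ p ∈ d.getD x [], p.1 ∈ comp' := by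
        intro x hx hxn p hp
        have hxc : x ∈ comp := by
          rcases (hmemc' x).1 hx with hx' | hx'
          · exact hx'
          · exact absurd hx' hxn
        by_cases hxf : x ∈ frontier
        · by_cases hpc : p.1 ∈ comp
          · exact (hmemc' p.1).2 (Or.inl hpc)
          · exact (hmemc' p.1).2 (Or.inr ((hmemnxt p.1).2 ⟨⟨x, hxf, p, hp, rfl⟩, hpc⟩))
        · exact (hmemc' p.1).2 (Or.inl (hcl x hxc hxf p hp))
      have hgrow : comp.length + 1 ≤ comp'.length := by
        obtain ⟨y, hy⟩ := List.isEmpty_eq_false_iff_exists_mem.1 (by simpa using hemp)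
        have hyn : y ∉ comp := ((hmemnxt y).1 hy).2
        have hss : comp.toFinset ⊂ comp'.toFinset := by
          constructor
          · intro z hz
            exact List.mem_toFinset.2 ((hmemc' z).2 (Or.inl (List.mem_toFinset.1 hz)))
          · intro hsub''
            exact hyn (List.mem_toFinset.1
              (hsub'' (List.mem_toFinset.2 ((hmemc' y).2 (Or.inr hy)))))
        have hc := Finset.card_lt_card hss
        rw [List.toFinset_card_of_nodup h1, List.toFinset_card_of_nodup h1'] at hc
        omega
      have hres := ih comp' nxt h1'
        (fun x hx => (hmemc' x).2 (Or.inr hx)) hsub' hcl' hsnd' (by omega)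
      exact ⟨hres.1, fun x hx => hres.2.1 x ((hmemc' x).2 (Or.inl hx)), hres.2.2.1,
        hres.2.2.2⟩

theorem pvBfs_run (d : PySem.Dict Int (List (Int × Int))) (start : Int) :
    (pvBfs d (2 + (pvUniv d).length) [start] [start]).Nodup ∧
    (∀ t, t ∈ pvBfs d (2 + (pvUniv d).length) [start] [start] ↔
      pvRA d (fun _ => False) start t) := by
  have h := pvBfs_spec d start (2 + (pvUniv d).length) [start] [start]
    (List.nodup_singleton start) (fun x hx => hx)
    (fun x hx => Or.inl (List.mem_singleton.1 hx))
    (fun x hx hxn => absurd hx hxn)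
    (fun t ht => by rw [List.mem_singleton.1 ht]; exact pvRA.refl start (fun h => h))
    (by simp; omega)
  refine ⟨h.1, fun t => ⟨h.2.2.1 t, ?_⟩⟩
  intro hra
  induction hra with
  | refl _ => exact h.2.1 start (List.mem_singleton_self start)
  | tail h1 h2 h3 ihr =>
    obtain ⟨p, hp, rfl⟩ := h2
    exact h.2.2.2 _ ihr p hp

-- the common step fact and outer induction
theorem pvOuter (d : PySem.Dict Int (List (Int × Int))) :
    ∀ (ks : List Int) (vA vB : List Int) (mn me : Int),
      (∀ x ∈ ks, x ∈ pvUniv d) →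
      vA.Nodup → vB.Nodup → (∀ x, x ∈ vA ↔ x ∈ vB) →
      pvClosed d (· ∈ vA) →
      (ks.foldl (pvStepA d (1 + (1 + pvDeg d) * (1 + (pvUniv d).length))) (vA, mn, me)).2 =
      (ks.foldl (pvStepB d (2 + (pvUniv d).length)) (vB, mn, me)).2 := by
  intro ks
  induction ks with
  | nil => intro vA vB mn me _ _ _ _ _; rfl
  | cons k ks ih =>
    intro vA vB mn me hks hvA hvB hAB hcl
    simp only [List.foldl_cons]
    by_cases hkA : k ∈ vA
    · rw [show pvStepA d (1 + (1 + pvDeg d) * (1 + (pvUniv d).length)) (vA, mn, me) k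
            = (vA, mn, me) from by simp [pvStepA, hkA],
          show pvStepB d (2 + (pvUniv d).length) (vB, mn, me) k
            = (vB, mn, me) from by simp [pvStepB, (hAB k).1 hkA]]
      exact ih vA vB mn me (fun x hx => hks x (List.mem_cons.2 (Or.inr hx))) hvA hvB hAB hcl
    · have hkB : k ∉ vB := fun h => hkA ((hAB k).2 h)
      have hkuniv : k ∈ pvUniv d := hks k List.mem_cons_self
      -- A's DFS phase
      set t := pvDfsA d (1 + (1 + pvDeg d) * (1 + (pvUniv d).length)) vA
        PySem.Set.empty PySem.Set.empty [k] with ht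
      have hdfs := pvDfsA_spec d (1 + (1 + pvDeg d) * (1 + (pvUniv d).length)) vA
        PySem.Set.empty PySem.Set.empty [k] hvA List.nodup_nil List.nodup_nil
        (fun x hx => by rw [List.mem_singleton.1 hx]; exact hkuniv)
        (by
          have h5 := pvM_le d vA
          have h6 : (1 + pvDeg d) * pvM d vA ≤ (1 + pvDeg d) * (1 + (pvUniv d).length) :=
            Nat.mul_le_mul_left _ (by omega)
          simp only [List.length_singleton]
          omega)
      rw [← ht] at hdfs
      have hone : ∀ (P : Int → Prop) x, (∃ s ∈ [k], pvRA d P s x) ↔ pvRA d P k x := by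
        intro P x; simp
      -- B's BFS phase
      have hrun := pvBfs_run d k
      set R := pvBfs d (2 + (pvUniv d).length) [k] [k] with hR
      set comp := PySem.Set.diff R vB with hcompdef
      have hcompN : comp.Nodup := PySem.Set.nodup_diff _ _ hrun.1
      have hcomp_iff : ∀ x, x ∈ comp ↔ pvRA d (· ∈ vA) k x := by
        intro x
        rw [hcompdef, PySem.Set.mem_diff, hrun.2 x, pvRA_closed_iff hcl]
        constructor
        · rintro ⟨h, hx⟩; exact ⟨h, fun hx' => hx ((hAB x).1 hx')⟩
        · rintro ⟨h, hx⟩; exact ⟨h, fun hx' => hx ((hAB x).2 hx')⟩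
      -- node counts agree
      have hNmem : ∀ x, x ∈ t.2.1 ↔ pvRA d (· ∈ vA) k x := by
        intro x
        rw [hdfs.2.2.2.2.1 x, hone]
        simp [PySem.Set.empty]
      have hNperm : t.2.1.length = comp.length :=
        ((List.perm_ext_iff_of_nodup hdfs.2.1 hcompN).2
          (fun x => by rw [hNmem x, hcomp_iff x])).length_eq
      have hn : PySem.Set.len t.2.1 = PySem.Set.len comp := by
        unfold PySem.Set.len; rw [hNperm]
      -- edge-id counts agree
      have hEmem : ∀ e, e ∈ t.2.2 ↔
          ∃ x, pvRA d (· ∈ vA) k x ∧ ∃ p ∈ d.getD x [], e = p.2 := by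
        intro e
        rw [hdfs.2.2.2.2.2 e]
        simp only [PySem.Set.empty, List.not_mem_nil, false_or, hone]
      have hBE : ∀ e, e ∈ pvEids d comp ↔
          ∃ x, pvRA d (· ∈ vA) k x ∧ ∃ p ∈ d.getD x [], e = p.2 := by
        intro e
        unfold pvEids
        rw [pvMemNested]
        simp only [PySem.Set.empty, List.not_mem_nil, false_or]
        constructor
        · rintro ⟨u, hu, p, hp, rfl⟩; exact ⟨u, (hcomp_iff u).1 hu, p, hp, rfl⟩
        · rintro ⟨u, hu, p, hp, rfl⟩; exact ⟨u, (hcomp_iff u).2 hu, p, hp, rfl⟩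
      have hEN : (pvEids d comp).Nodup :=
        pvNodupNested d Prod.snd comp PySem.Set.empty List.nodup_nil
      have hEperm : t.2.2.length = (pvEids d comp).length :=
        ((List.perm_ext_iff_of_nodup hdfs.2.2.1 hEN).2
          (fun e => by rw [hEmem e, hBE e])).length_eq
      have he : PySem.Set.len t.2.2 = PySem.Set.len (pvEids d comp) := by
        unfold PySem.Set.len; rw [hEperm]
      -- the two step results
      have hA : pvStepA d (1 + (1 + pvDeg d) * (1 + (pvUniv d).length)) (vA, mn, me) k =
          (t.1, if PySem.Set.len t.2.1 > mn ∨ (PySem.Set.len t.2.1 = mn ∧ PySem.Set.len t.2.2 > me)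
            then (PySem.Set.len t.2.1, PySem.Set.len t.2.2) else (mn, me)) := by
        simp only [pvStepA, ht]
        rw [if_neg hkA]
        split <;> rfl
      have hB : pvStepB d (2 + (pvUniv d).length) (vB, mn, me) k =
          (PySem.Set.union vB comp,
            if mn < PySem.Set.len comp ∨ (mn = PySem.Set.len comp ∧ me < PySem.Set.len (pvEids d comp))
            then (PySem.Set.len comp, PySem.Set.len (pvEids d comp)) else (mn, me)) := by
        simp only [pvStepB, hR, hcompdef]
        rw [if_neg hkB]
      rw [hA, hB]
      have hbest : (if PySem.Set.len t.2.1 > mn ∨ (PySem.Set.len t.2.1 = mn ∧ PySem.Set.len t.2.2 > me)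
            then (PySem.Set.len t.2.1, PySem.Set.len t.2.2) else (mn, me))
          = (if mn < PySem.Set.len comp ∨ (mn = PySem.Set.len comp ∧ me < PySem.Set.len (pvEids d comp))
            then (PySem.Set.len comp, PySem.Set.len (pvEids d comp)) else (mn, me)) := by
        rw [hn, he]
        exact if_congr (by omega) rfl rfl
      rw [hbest]
      -- invariants for the tail
      have hvA' : t.1.Nodup := hdfs.1
      have hvB' : (PySem.Set.union vB comp).Nodup := PySem.Set.nodup_union _ _ hvB
      have hAB' : ∀ x, x ∈ t.1 ↔ x ∈ PySem.Set.union vB comp := by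
        intro x
        rw [hdfs.2.2.2.1 x, hone, PySem.Set.mem_union, hAB x, hcomp_iff x]
      have hcl' : pvClosed d (· ∈ t.1) := by
        intro x hx p hp
        have hx' : x ∈ vA ∨ pvRA d (· ∈ vA) k x := by
          have := (hdfs.2.2.2.1 x).1 hx
          rwa [hone] at this
        have := pvClosed_after hcl k x hx' p hp
        rw [hdfs.2.2.2.1 p.1, hone]
        exact this
      exact ih t.1 (PySem.Set.union vB comp) _ _
        (fun x hx => hks x (List.mem_cons.2 (Or.inr hx))) hvA' hvB' hAB' hcl'

-- ===== VERDICT (by name: the statement is the Claim_ definition above) =====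
theorem largest_component_stats_py_spec : Claim_equal_largest_component_stats_py := by
  intro adj _
  unfold Spec_largest_component_stats_py largest_component_stats_py largest_component_stats_py_alt
  have h := pvOuter (PySem.Dict.ofList adj) (PySem.Dict.ofList adj).keys
    PySem.Set.empty PySem.Set.empty 0 0
    (fun x hx => by unfold pvUniv; exact List.mem_append_left _ hx)
    List.nodup_nil List.nodup_nil (fun x => Iff.rfl)
    (fun x hx => absurd hx (List.not_mem_nil))
  dsimp only
  rw [h]
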